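-- pv_equiv track=rewrite | github.com/sleipner01/jernbane | US-D.py | routeDataToDict
-- ===== SOURCE A (Python) =====
-- def routeDataToDict(routeData):
--     routes = {}
--     for route in routeData:
--         if route[0] not in routes:
--             routes[route[0]] = {}
--             routes[route[0]][route[1]] = str(route[3])
--         else:
--             if route[1] not in routes[route[0]]:
--                 routes[route[0]][route[1]] = str(route[3])
--             else:
--                 routes[route[0]][route[1]] += str(route[3])
--     return routes
-- ===== SOURCE B (Python) =====
-- def routeDataToDict(routeData):
--     # pass 1: flat accumulation keyed by the (outer, inner) pair, concatenating in order
--     acc = {}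
--     for route in routeData:
--         key = (route[0], route[1])
--         acc[key] = acc.get(key, '') + str(route[3])
--     # pass 2: reshape the flat dict into the nested one
--     routes = {}
--     for (a, b), value in acc.items():
--         routes.setdefault(a, {})[b] = value
--     return routes
-- ===== Notes on version B (the rewrite author's own statement) =====
-- stated objective: alternative
-- what changed: A builds the nested dict interleaved insert-by-insert; B makes two differently-shaped passes: a flat accumulation keyed by the (outer, inner) pair concatenating strings in order, then a reshape of the flat dict into the nested result.
import Mathlib
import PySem

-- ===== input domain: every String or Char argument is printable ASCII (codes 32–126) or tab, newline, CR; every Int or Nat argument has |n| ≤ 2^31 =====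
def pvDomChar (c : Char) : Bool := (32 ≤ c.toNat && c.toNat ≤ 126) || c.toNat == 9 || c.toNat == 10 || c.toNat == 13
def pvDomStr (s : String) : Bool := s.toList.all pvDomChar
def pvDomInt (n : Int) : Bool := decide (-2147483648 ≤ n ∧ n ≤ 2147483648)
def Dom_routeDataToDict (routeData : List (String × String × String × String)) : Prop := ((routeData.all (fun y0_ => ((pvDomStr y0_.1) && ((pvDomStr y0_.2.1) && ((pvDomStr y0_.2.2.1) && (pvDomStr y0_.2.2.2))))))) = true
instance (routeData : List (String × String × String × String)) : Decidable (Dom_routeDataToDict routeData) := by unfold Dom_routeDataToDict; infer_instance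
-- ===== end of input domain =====

-- B replaces A's interleaved nested-dict build by two differently-shaped passes — a flat
-- accumulation keyed by the (outer, inner) pair, then a reshape of that flat dict into the
-- nested one (objective: alternative decomposition, same cost).

-- ===== PORT A =====
def routeDataToDict (routeData : List (String × String × String × String)) : List (String × List (String × String)) :=
  (routeData.foldl
    (fun routes route =>
      match routes.get? route.1 with
      | none =>
          -- routes[route[0]] = {}; routes[route[0]][route[1]] = str(route[3])
          (routes.insert route.1 PySem.Dict.empty).insert route.1
            (PySem.Dict.empty.insert route.2.1 route.2.2.2)
      | some inner =>
          match inner.get? route.2.1 with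
          | none => routes.insert route.1 (inner.insert route.2.1 route.2.2.2)
          | some v => routes.insert route.1 (inner.insert route.2.1 (v ++ route.2.2.2)))
    (PySem.Dict.empty : PySem.Dict String (PySem.Dict String String))).items.map
    (fun p => (p.1, p.2.items))

-- ===== PORT B =====
def routeDataToDict_alt (routeData : List (String × String × String × String)) : List (String × List (String × String)) :=
  -- pass 1: flat accumulation keyed by the pair, concatenating in order
  let acc : PySem.Dict (String × String) String :=
    routeData.foldl
      (fun acc route =>
        acc.insert (route.1, route.2.1) (acc.getD (route.1, route.2.1) "" ++ route.2.2.2))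
      PySem.Dict.empty
  -- pass 2: reshape the flat dict into the nested one (setdefault(a, {})[b] = value)
  let routes : PySem.Dict String (PySem.Dict String String) :=
    acc.items.foldl
      (fun routes kv =>
        match routes.get? kv.1.1 with
        | some inner => routes.insert kv.1.1 (inner.insert kv.1.2 kv.2)
        | none => routes.insert kv.1.1 (PySem.Dict.empty.insert kv.1.2 kv.2))
      PySem.Dict.empty
  routes.items.map (fun p => (p.1, p.2.items))

-- ===== PRECONDITION & SPEC =====
def Spec_routeDataToDict (routeData : List (String × String × String × String)) (out : List (String × List (String × String))) : Prop := out = routeDataToDict_alt routeData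
instance (routeData : List (String × String × String × String)) (out : List (String × List (String × String))) : Decidable (Spec_routeDataToDict routeData out) := by unfold Spec_routeDataToDict; infer_instance

-- ===== CLAIM (what is proved, stated in full; the proofs are below) =====
def Claim_equal_routeDataToDict : Prop := ∀ (routeData : List (String × String × String × String)), Dom_routeDataToDict routeData → Spec_routeDataToDict routeData (routeDataToDict routeData)

-- ===== LEMMAS AND PROOFS =====

-- B's pass-2 step: set nested[a][b] := w, creating the inner dict when absent
def pvStep2 (n : PySem.Dict String (PySem.Dict String String)) (a b w : String) :
    PySem.Dict String (PySem.Dict String String) :=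
  match n.get? a with
  | some inner => n.insert a (inner.insert b w)
  | none => n.insert a (PySem.Dict.empty.insert b w)

-- A's loop step, named for the proofs
def pvStepA (routes : PySem.Dict String (PySem.Dict String String))
    (route : String × String × String × String) : PySem.Dict String (PySem.Dict String String) :=
  match routes.get? route.1 with
  | none =>
      (routes.insert route.1 PySem.Dict.empty).insert route.1
        (PySem.Dict.empty.insert route.2.1 route.2.2.2)
  | some inner =>
      match inner.get? route.2.1 with
      | none => routes.insert route.1 (inner.insert route.2.1 route.2.2.2)
      | some v => routes.insert route.1 (inner.insert route.2.1 (v ++ route.2.2.2))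

-- B's pass-1 accumulator, named for the proofs
def pvFlat (routeData : List (String × String × String × String)) :
    PySem.Dict (String × String) String :=
  routeData.foldl
    (fun acc route =>
      acc.insert (route.1, route.2.1) (acc.getD (route.1, route.2.1) "" ++ route.2.2.2))
    PySem.Dict.empty

-- B's pass 2 as a fold of pvStep2
def pvReshape (l : List ((String × String) × String))
    (n : PySem.Dict String (PySem.Dict String String)) :
    PySem.Dict String (PySem.Dict String String) :=
  l.foldl (fun n kv => pvStep2 n kv.1.1 kv.1.2 kv.2) n

theorem pvReshape_append (l1 l2 : List ((String × String) × String)) (n : PySem.Dict String (PySem.Dict String String)) :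
    pvReshape (l1 ++ l2) n = pvReshape l2 (pvReshape l1 n) := List.foldl_append ..

theorem pvReshape_cons (kv : (String × String) × String) (l : List ((String × String) × String)) (n : PySem.Dict String (PySem.Dict String String)) :
    pvReshape (kv :: l) n = pvReshape l (pvStep2 n kv.1.1 kv.1.2 kv.2) := rfl

-- two inserts at distinct keys commute when the first key is already present (its position is fixed)
theorem pvDictInsertComm {κ ν : Type} [BEq κ] [LawfulBEq κ] (d : PySem.Dict κ ν) (k k' : κ)
    (v v' : ν) (hk : d.contains k = true) (hne : k' ≠ k) :
    (d.insert k v).insert k' v' = (d.insert k' v').insert k v := by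
  apply PySem.Dict.ext
  by_cases hk' : d.contains k' = true
  · rw [PySem.Dict.items_insert_of_contains _ v' (by simp [PySem.Dict.contains_insert, hk']),
        PySem.Dict.items_insert_of_contains _ v hk,
        PySem.Dict.items_insert_of_contains _ v (by simp [PySem.Dict.contains_insert, hk]),
        PySem.Dict.items_insert_of_contains _ v' hk']
    simp only [List.map_map]
    congr 1
    funext p
    by_cases h1 : p.1 = k <;> by_cases h2 : p.1 = k' <;>
      simp_all [Function.comp]
  · have hc1 : (d.insert k v).contains k' = false := by
      simp [PySem.Dict.contains_insert, hne, hk']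
    have hc2 : (d.insert k' v').contains k = true := by
      simp [PySem.Dict.contains_insert, hk]
    rw [PySem.Dict.items_insert_of_not_contains _ v' hc1,
        PySem.Dict.items_insert_of_contains _ v hk,
        PySem.Dict.items_insert_of_contains _ v hc2,
        PySem.Dict.items_insert_of_not_contains _ v' (by simpa using hk')]
    simp [List.map_append, hne]

-- writing nested[a][b] twice keeps only the second value
theorem pvStep2_collapse (m : PySem.Dict String (PySem.Dict String String)) (a b v0 w : String) :
    pvStep2 (pvStep2 m a b v0) a b w = pvStep2 m a b w := by
  cases h : m.get? a <;>
    simp [pvStep2, h, PySem.Dict.get?_insert_self, PySem.Dict.insert_insert_self]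

-- the two-level lookup after one pvStep2
theorem pvGet2_step2 (n : PySem.Dict String (PySem.Dict String String)) (a b w a' b' : String) :
    ((pvStep2 n a b w).get? a').bind (fun i => i.get? b')
      = if a' = a ∧ b' = b then some w else (n.get? a').bind (fun i => i.get? b') := by
  by_cases ha : a' = a
  · subst ha
    cases h : n.get? a' <;>
      simp [pvStep2, h, PySem.Dict.get?_insert_self, PySem.Dict.get?_insert,
        PySem.Dict.get?_empty]
  · cases h : n.get? a <;>
      simp [pvStep2, h, PySem.Dict.get?_insert_of_ne _ _ ha, ha]

-- nested writes at distinct (a,b)-keys commute when (a,b) is already present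
theorem pvStep2_comm (M : PySem.Dict String (PySem.Dict String String)) (a b w a' b' w' : String)
    (hne : ¬(a' = a ∧ b' = b))
    (hpres : (((M.get? a).bind (fun i => i.get? b)).isSome = true)) :
    pvStep2 (pvStep2 M a b w) a' b' w' = pvStep2 (pvStep2 M a' b' w') a b w := by
  obtain ⟨inner, h1⟩ : ∃ i, M.get? a = some i := by
    cases h : M.get? a <;> simp [h] at hpres ⊢
  obtain ⟨v0, h2⟩ : ∃ v0, inner.get? b = some v0 := by
    rw [h1] at hpres
    cases h : inner.get? b <;> simp [h] at hpres ⊢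
  have hcb : inner.contains b = true := by
    rw [PySem.Dict.contains_eq_isSome_get?, h2]; rfl
  have hca : M.contains a = true := by
    rw [PySem.Dict.contains_eq_isSome_get?, h1]; rfl
  by_cases ha : a' = a
  · subst ha
    have hb : b' ≠ b := by intro hb; exact hne ⟨rfl, hb⟩
    simp only [pvStep2, h1, PySem.Dict.get?_insert_self, PySem.Dict.insert_insert_self]
    rw [pvDictInsertComm inner b b' w w' hcb hb]
  · have ha' : a ≠ a' := fun h => ha h.symm
    cases h3 : M.get? a' <;>
      simp only [pvStep2, h1, h3, PySem.Dict.get?_insert_of_ne _ _ ha,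
        PySem.Dict.get?_insert_of_ne _ _ ha'] <;>
      rw [pvDictInsertComm M a a' _ _ hca ha]

-- overwriting nested[a][b] now or after entries whose keys avoid (a,b) is the same
theorem pvReshape_overwrite (l : List ((String × String) × String)) :
    ∀ (M : PySem.Dict String (PySem.Dict String String)) (a b w : String),
    (∀ kv ∈ l, kv.1 ≠ (a, b)) →
    (((M.get? a).bind (fun i => i.get? b)).isSome = true) →
    pvReshape l (pvStep2 M a b w) = pvStep2 (pvReshape l M) a b w := by
  induction l with
  | nil => intro M a b w _ _; rfl
  | cons kv t ih =>
    intro M a b w hk hpres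
    have hne : ¬(kv.1.1 = a ∧ kv.1.2 = b) := by
      intro ⟨h1, h2⟩
      exact hk kv (List.mem_cons_self ..) (by rw [← h1, ← h2])
    show pvReshape t (pvStep2 (pvStep2 M a b w) kv.1.1 kv.1.2 kv.2) = _
    rw [pvStep2_comm M a b w kv.1.1 kv.1.2 kv.2 hne hpres]
    have hpres' : (((pvStep2 M kv.1.1 kv.1.2 kv.2).get? a).bind (fun i => i.get? b)).isSome = true := by
      rw [pvGet2_step2]
      split
      · rfl
      · exact hpres
    rw [ih (pvStep2 M kv.1.1 kv.1.2 kv.2) a b w (fun x hx => hk x (List.mem_cons_of_mem _ hx)) hpres']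
    rfl

-- two-level lookup through the reshape of a flat list with distinct keys = first match in the list
theorem pvGet2_reshape (l : List ((String × String) × String)) :
    ∀ (n : PySem.Dict String (PySem.Dict String String)) (a b : String),
    (l.map Prod.fst).Nodup →
    ((pvReshape l n).get? a).bind (fun i => i.get? b)
      = ((l.find? (fun kv => kv.1 == (a, b))).map (·.2)).or
          ((n.get? a).bind (fun i => i.get? b)) := by
  induction l with
  | nil => intro n a b _; simp [pvReshape]
  | cons kv t ih =>
    intro n a b hnd
    simp only [List.map_cons, List.nodup_cons] at hnd
    obtain ⟨hnotin, hndt⟩ := hnd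
    show ((pvReshape t (pvStep2 n kv.1.1 kv.1.2 kv.2)).get? a).bind _ = _
    rw [ih _ a b hndt, pvGet2_step2]
    by_cases hab : a = kv.1.1 ∧ b = kv.1.2
    · obtain ⟨h1, h2⟩ := hab
      have hkey : kv.1 = (a, b) := by rw [h1, h2]
      have hfind : t.find? (fun p => p.1 == (a, b)) = none := by
        rw [List.find?_eq_none]
        intro x hx
        simp only [beq_iff_eq]
        intro hx1
        apply hnotin
        rw [hkey, ← hx1]
        exact List.mem_map_of_mem hx
      rw [List.find?_cons_of_pos (by simp [hkey]), hfind]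
      simp [h1, h2]
    · have hkey : (kv.1 == (a, b)) = false := by
        simp only [beq_eq_false_iff_ne, ne_eq, Prod.ext_iff, not_and]
        intro h1 h2
        exact hab ⟨h1.symm, h2.symm⟩
      rw [List.find?_cons_of_neg (by simp [hkey])]
      simp [hab]

-- Dict.get? is the first match on the items list
theorem pvDictGet?_eq_find? {ν : Type} (d : PySem.Dict (String × String) ν) (k : String × String) :
    d.get? k = (d.items.find? (fun kv => kv.1 == k)).map (·.2) := by
  obtain ⟨l⟩ := d
  induction l with
  | nil => rfl
  | cons kv t ih =>
    rw [show (PySem.Dict.mk (kv :: t)).items = kv :: t from rfl]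
    obtain ⟨k0, v0⟩ := kv
    rw [PySem.Dict.get?_mk_cons]
    by_cases h : k0 == k
    · rw [List.find?_cons_of_pos (by simpa using h)]
      simp [h]
    · rw [List.find?_cons_of_neg (by simpa using h)]
      simp only [h]
      simpa using ih

-- the key step: reshaping after a flat insert = one nested write after reshaping
theorem pvReshape_insert (f : PySem.Dict (String × String) String) (a b w : String)
    (hnd : f.keys.Nodup) :
    pvReshape ((f.insert (a, b) w).items) PySem.Dict.empty
      = pvStep2 (pvReshape f.items PySem.Dict.empty) a b w := by
  by_cases hc : f.contains (a, b) = true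
  · -- key present: items_insert is a map-replace; split f.items around the key
    have hsome : ∃ v0, f.get? (a, b) = some v0 := by
      rw [PySem.Dict.contains_eq_isSome_get?] at hc
      cases h : f.get? (a, b) <;> simp [h] at hc ⊢
    obtain ⟨v0, hv0⟩ := hsome
    have hfind : f.items.find? (fun kv => kv.1 == (a, b)) = some ((a, b), v0) := by
      rw [pvDictGet?_eq_find?] at hv0
      cases h : f.items.find? (fun kv => kv.1 == (a, b)) with
      | none => rw [h] at hv0; simp at hv0
      | some x =>
        rw [h] at hv0
        have hx : (x.1 == (a, b)) = true := (List.find?_eq_some_iff_append.mp h).1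
        simp only [Option.map_some] at hv0
        have : x = ((a, b), v0) := by
          obtain ⟨x1, x2⟩ := x
          simp only [beq_iff_eq] at hx
          simp_all
        rw [this]
    obtain ⟨hpx, l1, l2, hsplit, hl1⟩ := List.find?_eq_some_iff_append.mp hfind
    have hitems : (f.insert (a, b) w).items = l1 ++ ((a, b), w) :: l2 := by
      rw [PySem.Dict.items_insert_of_contains _ w hc, hsplit]
      rw [List.map_append, List.map_cons]
      congr 1
      · have : List.map (fun p => if (p.1 == (a, b)) = true then ((a, b), w) else p) l1
            = List.map id l1 := by
          apply List.map_congr_left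
          intro x hx
          have := hl1 x hx
          simp only [Bool.not_eq_eq_eq_not, Bool.not_true] at this
          simp [this]
        simpa using this
      · congr 1
        · simp
        · -- l2 keys are untouched: nodup gives no (a,b) in l2
          have hgoal : List.map (fun p => if (p.1 == (a, b)) = true then ((a, b), w) else p) l2
              = List.map id l2 := by
            apply List.map_congr_left
            intro x hx
            have hnd' : ((a, b) ∈ l2.map Prod.fst) → False := by
              intro hmem
              rw [show f.keys = f.items.map Prod.fst from rfl, hsplit] at hnd
              simp only [List.map_append, List.map_cons, List.nodup_append] at hnd
              have := hnd.2.1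
              simp only [List.nodup_cons] at this
              exact this.1 hmem
            have hne : (x.1 == (a, b)) = false := by
              simp only [beq_eq_false_iff_ne, ne_eq]
              intro h
              exact hnd' (h ▸ List.mem_map_of_mem hx)
            simp [hne]
          simpa using hgoal
    have hl2 : ∀ kv ∈ l2, kv.1 ≠ (a, b) := by
      intro kv hkv h
      rw [show f.keys = f.items.map Prod.fst from rfl, hsplit] at hnd
      simp only [List.map_append, List.map_cons, List.nodup_append, List.nodup_cons] at hnd
      exact hnd.2.1.1 (h ▸ List.mem_map_of_mem hkv)
    rw [hitems, hsplit, pvReshape_append, pvReshape_append, pvReshape_cons, pvReshape_cons]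
    show pvReshape l2 (pvStep2 (pvReshape l1 PySem.Dict.empty) a b w)
      = pvStep2 (pvReshape l2 (pvStep2 (pvReshape l1 PySem.Dict.empty) a b v0)) a b w
    rw [← pvStep2_collapse (pvReshape l1 PySem.Dict.empty) a b v0 w]
    apply pvReshape_overwrite l2 _ a b w hl2
    rw [pvGet2_step2]
    simp
  · rw [PySem.Dict.items_insert_of_not_contains _ w (by simpa using hc)]
    rw [pvReshape_append]
    rfl

-- A's step is a nested write of the old value extended by route[3]
theorem pvStepA_eq (n : PySem.Dict String (PySem.Dict String String))
    (r : String × String × String × String) :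
    pvStepA n r
      = pvStep2 n r.1 r.2.1
          ((((n.get? r.1).bind (fun i => i.get? r.2.1)).getD "") ++ r.2.2.2) := by
  cases h : n.get? r.1 with
  | none =>
    simp only [pvStepA, pvStep2, h, Option.bind_none, Option.getD_none, String.empty_append,
      PySem.Dict.insert_insert_self]
  | some inner =>
    cases h2 : inner.get? r.2.1 <;>
      simp [pvStepA, pvStep2, h, h2, String.empty_append]

theorem pvFlat_nodup (rd : List (String × String × String × String)) :
    (pvFlat rd).keys.Nodup := by
  unfold pvFlat
  apply PySem.Dict.nodup_keys_foldl_insert_key rd (fun r => (r.1, r.2.1))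
    (fun d r => d.getD (r.1, r.2.1) "" ++ r.2.2.2)
  simp [PySem.Dict.keys_empty]

theorem pvMain (rd : List (String × String × String × String)) :
    rd.foldl pvStepA PySem.Dict.empty = pvReshape (pvFlat rd).items PySem.Dict.empty := by
  induction rd using List.reverseRecOn with
  | nil => rfl
  | append_singleton rd r ih =>
    rw [List.foldl_append, List.foldl_cons, List.foldl_nil, ih]
    have hflat : pvFlat (rd ++ [r])
        = (pvFlat rd).insert (r.1, r.2.1) ((pvFlat rd).getD (r.1, r.2.1) "" ++ r.2.2.2) := by
      unfold pvFlat
      rw [List.foldl_append, List.foldl_cons, List.foldl_nil]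
    rw [hflat, pvReshape_insert _ _ _ _ (pvFlat_nodup rd), pvStepA_eq]
    congr 1
    rw [pvGet2_reshape _ _ _ _ (by exact pvFlat_nodup rd)]
    rw [PySem.Dict.get?_empty]
    simp only [Option.bind_none, Option.or_none]
    rw [show (pvFlat rd).getD (r.1, r.2.1) "" = ((pvFlat rd).get? (r.1, r.2.1)).getD "" from rfl]
    rw [pvDictGet?_eq_find?]

-- ===== VERDICT (by name: the statement is the Claim_ definition above) =====
theorem routeDataToDict_spec : Claim_equal_routeDataToDict := by
  intro rd _
  show _ = _
  show (rd.foldl pvStepA PySem.Dict.empty).items.map (fun p => (p.1, p.2.items))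
      = (pvReshape (pvFlat rd).items PySem.Dict.empty).items.map (fun p => (p.1, p.2.items))
  rw [pvMain]
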